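-- pv_equiv track=rewrite | github.com/koychevo/python_HackBulgaria | Programming0-1/week5/budget.py | on_budget
-- ===== SOURCE A (Python) =====
-- def on_budget(books, budget):
--     result = {
--         "books_on_budget": 0,
--         "loan": 0
--     }
--     books.sort()
--     total_sum = 0
--     for book in books:
--         if book <= budget:
--             result["books_on_budget"] += 1
--             budget -= book
--         else:
--             total_sum += book
--     if total_sum > budget:
--         result["loan"] = total_sum - budget
--     return result
-- ===== SOURCE B (Python) =====
-- from itertools import accumulate
--
-- def on_budget(books, budget):
--     books.sort()  # same in-place mutation as A
--     prefixes = list(accumulate(books))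
--     count = 0
--     taken_sum = 0
--     for p in prefixes:
--         if p > budget:
--             break
--         count += 1
--         taken_sum = p
--     remaining = budget - taken_sum
--     tail = (prefixes[-1] if prefixes else 0) - taken_sum
--     loan = tail - remaining if tail > remaining else 0
--     return {"books_on_budget": count, "loan": loan}
-- ===== Notes on version B (the rewrite author's own statement) =====
-- stated objective: alternative
-- what changed: Replaces A's single greedy pass that threads a shrinking budget and a running tail sum with a prefix-sum table (itertools.accumulate): the count is the scan position of the first cumulative total exceeding the budget, and the loan is computed arithmetically from the last accepted prefix and the grand total.
import Mathlib
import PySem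

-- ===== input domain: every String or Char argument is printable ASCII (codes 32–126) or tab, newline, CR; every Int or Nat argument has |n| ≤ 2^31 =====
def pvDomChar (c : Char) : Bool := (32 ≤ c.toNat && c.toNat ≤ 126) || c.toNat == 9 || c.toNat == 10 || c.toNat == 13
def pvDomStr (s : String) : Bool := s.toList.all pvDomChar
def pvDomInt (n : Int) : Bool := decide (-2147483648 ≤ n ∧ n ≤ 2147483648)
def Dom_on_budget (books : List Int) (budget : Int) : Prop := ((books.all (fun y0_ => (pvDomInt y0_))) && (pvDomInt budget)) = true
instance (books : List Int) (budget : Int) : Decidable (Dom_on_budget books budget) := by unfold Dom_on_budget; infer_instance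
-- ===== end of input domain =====

-- B replaces A's budget-threading greedy loop by a prefix-sum table and arithmetic on its
-- last accepted entry (objective: alternative). Both versions sort the books list in place
-- in Python; the equivalence proved here is about the return value.

-- ===== PORT A =====
-- one loop step: state (books_on_budget, budget, total_sum)
def onBudgetStepA (s : Int × Int × Int) (book : Int) : Int × Int × Int :=
  if book ≤ s.2.1 then (s.1 + 1, s.2.1 - book, s.2.2) else (s.1, s.2.1, s.2.2 + book)

def on_budget (books : List Int) (budget : Int) : List (String × Int) :=
  let sortedBooks := PySem.List.sorted books (fun x => x) false
  let st := sortedBooks.foldl onBudgetStepA (0, budget, 0)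
  [("books_on_budget", st.1), ("loan", if st.2.2 > st.2.1 then st.2.2 - st.2.1 else 0)]

-- ===== PORT B =====
-- itertools.accumulate(books) with running sum a
def pvAccum (a : Int) : List Int → List Int
  | [] => []
  | x :: xs => (a + x) :: pvAccum (a + x) xs

-- the for-loop with break: returns (count, taken_sum); taken_sum starts as a
def pvScanStop (budget : Int) : List Int → Int × Int → Int × Int
  | [], st => st
  | p :: ps, st => if p > budget then st else pvScanStop budget ps (st.1 + 1, p)

def on_budget_alt (books : List Int) (budget : Int) : List (String × Int) :=
  let sortedBooks := PySem.List.sorted books (fun x => x) false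
  let prefixes := pvAccum 0 sortedBooks
  let ct := pvScanStop budget prefixes (0, 0)
  let remaining := budget - ct.2
  let tail := prefixes.getLastD 0 - ct.2
  [("books_on_budget", ct.1), ("loan", if tail > remaining then tail - remaining else 0)]

-- ===== PRECONDITION & SPEC =====
def Spec_on_budget (books : List Int) (budget : Int) (out : List (String × Int)) : Prop := out = on_budget_alt books budget
instance (books : List Int) (budget : Int) (out : List (String × Int)) : Decidable (Spec_on_budget books budget out) := by unfold Spec_on_budget; infer_instance

-- ===== CLAIM (what is proved, stated in full; the proofs are below) =====
def Claim_equal_on_budget : Prop := ∀ (books : List Int) (budget : Int), Dom_on_budget books budget → Spec_on_budget books budget (on_budget books budget)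

-- ===== LEMMAS AND PROOFS =====

-- last of the accumulate table is the offset plus the list sum
theorem pvAccum_getLastD (l : List Int) : ∀ a : Int, (pvAccum a l).getLastD a = a + l.sum := by
  induction l with
  | nil => intro a; simp [pvAccum]
  | cons x xs ih =>
      intro a
      simp only [pvAccum, List.getLastD_cons, List.sum_cons]
      rw [ih (a + x)]
      ring

-- if every remaining book exceeds the budget, A's loop only accumulates total_sum
theorem foldA_all_fail (l : List Int) : ∀ (c b t : Int), (∀ y ∈ l, b < y) →
    l.foldl onBudgetStepA (c, b, t) = (c, b, t + l.sum) := by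
  induction l with
  | nil => intro c b t _; simp
  | cons x xs ih =>
      intro c b t h
      have hx : b < x := h x (List.mem_cons_self ..)
      simp only [List.foldl_cons, onBudgetStepA, if_neg (by omega : ¬ x ≤ b)]
      rw [ih c b (t + x) (fun y hy => h y (List.mem_cons_of_mem _ hy))]
      simp only [List.sum_cons]
      ring_nf

-- main invariant: A's fold over a sorted segment versus B's stop-scan over its accumulate table
theorem fold_eq_scan (l : List Int) (hs : l.Pairwise (· ≤ ·)) :
    ∀ (a budget c t : Int),
      l.foldl onBudgetStepA (c, budget - a, t) =
        ((pvScanStop budget (pvAccum a l) (c, a)).1,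
         budget - (pvScanStop budget (pvAccum a l) (c, a)).2,
         t + (a + l.sum - (pvScanStop budget (pvAccum a l) (c, a)).2)) := by
  induction l with
  | nil => intro a budget c t; simp [pvAccum, pvScanStop]
  | cons x xs ih =>
      intro a budget c t
      rcases List.pairwise_cons.mp hs with ⟨hx, hxs⟩
      by_cases h : a + x > budget
      · -- first exceedance: A rejects x and (by sortedness) all later books; B stops
        have hb : ¬ x ≤ budget - a := by omega
        simp only [pvAccum, pvScanStop, if_pos h, List.foldl_cons, onBudgetStepA, if_neg hb]
        rw [foldA_all_fail xs c (budget - a) (t + x)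
              (fun y hy => by have := hx y hy; omega)]
        simp only [List.sum_cons]
        refine Prod.ext_iff.mpr ⟨rfl, Prod.ext_iff.mpr ⟨rfl, by ring⟩⟩
      · have hb : x ≤ budget - a := by omega
        simp only [pvAccum, pvScanStop, if_neg h, List.foldl_cons, onBudgetStepA, if_pos hb]
        have : budget - a - x = budget - (a + x) := by ring
        rw [this, ih hxs (a + x) budget (c + 1) t]
        simp only [List.sum_cons]
        refine Prod.ext_iff.mpr ⟨rfl, Prod.ext_iff.mpr ⟨rfl, by ring⟩⟩

-- ===== VERDICT (by name: the statement is the Claim_ definition above) =====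
theorem on_budget_spec : Claim_equal_on_budget := by
  intro books budget _
  unfold Spec_on_budget on_budget on_budget_alt
  have hs : (PySem.List.sorted books (fun x => x) false).Pairwise (· ≤ ·) :=
    PySem.List.sorted_pairwise books (fun x => x)
  have h := fold_eq_scan (PySem.List.sorted books (fun x => x) false) hs 0 budget 0 0
  simp only [sub_zero] at h
  simp only [h, pvAccum_getLastD]
  norm_num
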